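-- pv_equiv track=rewrite | github.com/hasibulhasanjoy/dsp-lab | sixPoint.py | six_point_diff
-- ===== SOURCE A (Python) =====
-- def six_point_diff(a):
--     res = []
--     for i in range(len(a)):
--         if i < 6:
--             res.append(0)
--         else:
--             res.append(a[i] - a[i - 6])
--
--     return res
-- ===== SOURCE B (Python) =====
-- def six_point_diff(a):
--     res = []
--     window = []
--     for x in a:
--         if len(window) == 6:
--             res.append(x - window.pop(0))
--         else:
--             res.append(0)
--         window.append(x)
--     return res
-- ===== Notes on version B (the rewrite author's own statement) =====
-- stated objective: alternative
-- what changed: Replaces A's indexed loop with an i<6 branch and a[i-6] lookups by a streaming single pass that maintains a FIFO sliding window of the last six elements: emit 0 while the window is filling, otherwise subtract the element popped from the window's front; no index arithmetic or random access at all.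
import Mathlib
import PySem

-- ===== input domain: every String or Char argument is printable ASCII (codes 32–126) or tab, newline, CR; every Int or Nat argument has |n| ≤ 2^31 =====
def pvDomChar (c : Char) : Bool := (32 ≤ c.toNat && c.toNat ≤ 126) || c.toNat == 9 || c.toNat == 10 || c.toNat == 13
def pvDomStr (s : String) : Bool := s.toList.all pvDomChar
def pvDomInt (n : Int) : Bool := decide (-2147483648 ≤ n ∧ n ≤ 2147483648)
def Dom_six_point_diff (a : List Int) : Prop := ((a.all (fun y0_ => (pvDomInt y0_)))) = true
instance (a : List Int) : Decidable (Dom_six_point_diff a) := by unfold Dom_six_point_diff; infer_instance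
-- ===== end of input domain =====

-- B replaces A's indexed loop with a[i-6] lookups by a streaming pass over the elements that
-- maintains a FIFO window of the last six values (objective: alternative).

-- ===== PORT A =====
-- a[i] and a[i-6] are always in range for 6 ≤ i < len(a), so pyGetD's default is never used.
def six_point_diff (a : List Int) : List Int :=
  (PySem.List.pyRange 0 a.length 1).foldl
    (fun res i =>
      if i < 6 then res ++ [0]
      else res ++ [PySem.List.pyGetD a i 0 - PySem.List.pyGetD a (i - 6) 0]) []

-- ===== PORT B =====
-- Loop body of Source B as a helper on the state (res, window); window.pop(0) is
-- PySem.List.pop? _ 0 (its none branch is unreachable: the window has length 6 there).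
def pvStep (st : List Int × List Int) (x : Int) : List Int × List Int :=
  let st' :=
    if st.2.length == 6 then
      match PySem.List.pop? st.2 0 with
      | some (v, w') => (st.1 ++ [x - v], w')
      | none => (st.1, st.2)
    else (st.1 ++ [0], st.2)
  (st'.1, st'.2 ++ [x])

def six_point_diff_alt (a : List Int) : List Int :=
  (a.foldl pvStep ([], [])).1

-- ===== PRECONDITION & SPEC =====
def Spec_six_point_diff (a : List Int) (out : List Int) : Prop := out = six_point_diff_alt a
instance (a : List Int) (out : List Int) : Decidable (Spec_six_point_diff a out) := by unfold Spec_six_point_diff; infer_instance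

-- ===== CLAIM (what is proved, stated in full; the proofs are below) =====
def Claim_equal_six_point_diff : Prop := ∀ (a : List Int), Dom_six_point_diff a → Spec_six_point_diff a (six_point_diff a)

-- ===== LEMMAS AND PROOFS =====

theorem six_point_diff_eq_map (a : List Int) :
    six_point_diff a =
      (PySem.List.pyRange 0 a.length 1).map
        (fun i => if i < 6 then 0 else PySem.List.pyGetD a i 0 - PySem.List.pyGetD a (i - 6) 0) := by
  unfold six_point_diff
  have h : (fun (res : List Int) (i : Int) =>
      if i < 6 then res ++ [0]
      else res ++ [PySem.List.pyGetD a i 0 - PySem.List.pyGetD a (i - 6) 0]) =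
      (fun res i => res ++ [if i < 6 then 0 else PySem.List.pyGetD a i 0 - PySem.List.pyGetD a (i - 6) 0]) := by
    funext res i; split_ifs <;> rfl
  rw [h, PySem.List.foldl_append_singleton_eq_map, List.nil_append]

-- A in closed form: zero prefix followed by differences of the list zipped with itself 6 back.
theorem six_point_diff_closed (a : List Int) :
    six_point_diff a =
      List.replicate (min a.length 6) 0 ++ List.zipWith (fun x y => x - y) (a.drop 6) a := by
  rw [six_point_diff_eq_map]
  apply List.ext_getElem
  · simp [PySem.List.length_pyRange_one, List.length_zipWith]
    omega
  · intro k h1 h2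
    have hk : k < a.length := by
      simpa [PySem.List.length_pyRange_one] using h1
    rw [List.getElem_map, PySem.List.getElem_pyRange_one]
    by_cases h6 : k < 6
    · have hmin : k < min a.length 6 := by omega
      rw [List.getElem_append_left (by simpa using hmin)]
      simp [h6]
    · have hmin : min a.length 6 = 6 := by omega
      rw [List.getElem_append_right (by simp [hmin]; omega)]
      have hlt : ¬ ((0 : Int) + k < 6) := by omega
      rw [if_neg hlt, List.getElem_zipWith]
      simp only [List.length_replicate, hmin, List.getElem_drop]
      have e1 : ((0 : Int) + k) = ((k : Nat) : Int) := by push_cast; ring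
      have e2 : ((k : Nat) : Int) - 6 = ((k - 6 : Nat) : Int) := by push_cast; omega
      rw [e1, e2, PySem.List.pyGetD_natCast, PySem.List.pyGetD_natCast,
          List.getD_eq_getElem a 0 hk,
          List.getD_eq_getElem a 0 (show k - 6 < a.length by omega)]
      congr 2 <;> omega

-- The two shapes one loop step can take.
theorem pvStep_full (res : List Int) (v : Int) (t : List Int) (x : Int)
    (h : (v :: t).length = 6) :
    pvStep (res, v :: t) x = (res ++ [x - v], t ++ [x]) := by
  simp [pvStep, h, PySem.List.pop?_zero_cons]

theorem pvStep_fill (res w : List Int) (x : Int) (h : w.length ≠ 6) :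
    pvStep (res, w) x = (res ++ [0], w ++ [x]) := by
  simp [pvStep, h]

-- The window-fold invariant: starting from an arbitrary window of length ≤ 6.
theorem window_fold (l : List Int) : ∀ (res w : List Int), w.length ≤ 6 →
    (l.foldl pvStep (res, w)).1 =
    res ++ List.replicate (min l.length (6 - w.length)) 0 ++
      List.zipWith (fun x y => x - y) (l.drop (6 - w.length)) (w ++ l) := by
  induction l with
  | nil => intro res w _; simp
  | cons x xs ih =>
    intro res w hw
    by_cases h6 : w.length = 6
    · obtain ⟨v, t, rfl⟩ : ∃ v t, w = v :: t := by
        cases w with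
        | nil => simp at h6
        | cons v t => exact ⟨v, t, rfl⟩
      rw [List.foldl_cons, pvStep_full res v t x h6]
      have ht : (t ++ [x]).length ≤ 6 := by
        simp at h6 ⊢; omega
      rw [ih (res ++ [x - v]) (t ++ [x]) ht]
      have hlen : (t ++ [x]).length = 6 := by simp at h6 ⊢; omega
      simp only [hlen, h6]
      simp only [Nat.sub_self, Nat.min_zero, List.replicate_zero, List.drop_zero,
        List.append_nil, List.append_assoc, List.cons_append]
      simp [List.zipWith]
    · rw [List.foldl_cons, pvStep_fill res w x h6]
      have hw' : (w ++ [x]).length ≤ 6 := by simp; omega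
      rw [ih (res ++ [0]) (w ++ [x]) hw']
      have hlen : (w ++ [x]).length = w.length + 1 := by simp
      rw [hlen]
      have hdrop : (x :: xs).drop (6 - w.length) = xs.drop (6 - (w.length + 1)) := by
        have : 6 - w.length = (6 - (w.length + 1)) + 1 := by omega
        rw [this]; rfl
      have hrep : min (x :: xs).length (6 - w.length) =
          min xs.length (6 - (w.length + 1)) + 1 := by
        simp only [List.length_cons]; omega
      have happ : w ++ x :: xs = (w ++ [x]) ++ xs := by simp
      rw [hdrop, hrep, happ, List.replicate_succ]
      simp [List.append_assoc]

-- ===== VERDICT (by name: the statement is the Claim_ definition above) =====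
theorem six_point_diff_spec : Claim_equal_six_point_diff := by
  intro a _
  show six_point_diff a = six_point_diff_alt a
  rw [six_point_diff_closed]
  unfold six_point_diff_alt
  rw [window_fold a [] [] (by simp)]
  simp
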